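-- pv_equiv track=rewrite | github.com/VorosDavidVasvari/Unittest2 | Main.py | elmozdulas
-- ===== SOURCE A (Python) =====
-- def elmozdulas(path: str) -> str:
--     x = 0
--     y = 0
--
--     for seps in path:
--         if seps == 'J':
--             x += 1
--         elif seps == 'B':
--             x -= 1
--         elif seps == 'F':
--             y += 1
--         elif seps == 'L':
--             y -= 1
--
--     if x == 0 and y == 0:
--         return "Nem mentunk sehova"
--
--     eredmeny = []
--
--     if x > 0:
--         eredmeny.append(f"{x} lepes jobbra")
--     elif x < 0:
--         eredmeny.append(f"{-x} lepes balra")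
--
--     if y > 0:
--         eredmeny.append(f"{y} lepes fel")
--     elif y < 0:
--         eredmeny.append(f"{-y} lepes le")
--
--     return ", ".join(eredmeny)
-- ===== SOURCE B (Python) =====
-- def elmozdulas(path: str) -> str:
--     def disp(s):
--         # divide-and-conquer: displacement of a path is the sum of the
--         # displacements of its halves
--         if len(s) <= 1:
--             return {'J': (1, 0), 'B': (-1, 0), 'F': (0, 1), 'L': (0, -1)}.get(s, (0, 0))
--         m = len(s) // 2
--         ax, ay = disp(s[:m])
--         bx, by = disp(s[m:])
--         return (ax + bx, ay + by)
--
--     x, y = disp(path)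
--     if x == 0 and y == 0:
--         return "Nem mentunk sehova"
--
--     parts = []
--     for v, pos, neg in ((x, "jobbra", "balra"), (y, "fel", "le")):
--         if v != 0:
--             parts.append(f"{abs(v)} lepes {pos if v > 0 else neg}")
--     return ", ".join(parts)
-- ===== Notes on version B (the rewrite author's own statement) =====
-- stated objective: alternative
-- what changed: Replaces the linear branchy accumulation loop by a divide-and-conquer recursion (displacement of a path = sum of the displacements of its two halves, single-char base case via a dict lookup) and replaces the two hand-written formatting branch pairs by one table-driven loop over (value, positive-word, negative-word) triples using abs.
import Mathlib
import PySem

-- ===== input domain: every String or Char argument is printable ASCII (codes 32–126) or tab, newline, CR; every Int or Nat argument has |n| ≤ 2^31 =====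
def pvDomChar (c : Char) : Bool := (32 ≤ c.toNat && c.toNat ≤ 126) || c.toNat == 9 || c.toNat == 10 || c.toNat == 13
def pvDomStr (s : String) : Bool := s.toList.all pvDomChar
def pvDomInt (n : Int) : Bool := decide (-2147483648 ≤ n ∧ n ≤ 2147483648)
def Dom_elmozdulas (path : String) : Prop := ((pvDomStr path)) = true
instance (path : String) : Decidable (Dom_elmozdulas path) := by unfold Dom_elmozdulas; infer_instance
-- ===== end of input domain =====

-- B computes the displacement by divide-and-conquer on the two halves of the path (dict-lookup base
-- case) and formats via one table-driven loop instead of A's accumulation loop and branch pairs;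
-- objective: alternative structure, same O(n) cost.

-- ===== PORT A =====
-- the loop body of A: one step of the x/y accumulator
def pvStep (p : Int × Int) (seps : Char) : Int × Int :=
  if seps == 'J' then (p.1 + 1, p.2)
  else if seps == 'B' then (p.1 - 1, p.2)
  else if seps == 'F' then (p.1, p.2 + 1)
  else if seps == 'L' then (p.1, p.2 - 1)
  else p

def elmozdulas (path : String) : String :=
  let p := path.toList.foldl pvStep (0, 0)
  let x := p.1
  let y := p.2
  if x = 0 ∧ y = 0 then "Nem mentunk sehova"
  else
    let eredmeny : List String := []
    let eredmeny :=
      if x > 0 then eredmeny ++ [PySem.Int.toStr x ++ " lepes jobbra"]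
      else if x < 0 then eredmeny ++ [PySem.Int.toStr (-x) ++ " lepes balra"]
      else eredmeny
    let eredmeny :=
      if y > 0 then eredmeny ++ [PySem.Int.toStr y ++ " lepes fel"]
      else if y < 0 then eredmeny ++ [PySem.Int.toStr (-y) ++ " lepes le"]
      else eredmeny
    PySem.Str.join ", " eredmeny

-- ===== PORT B =====
-- B's single-char table (Python dict .get with default (0, 0))
def pvTable : PySem.Dict Char (Int × Int) :=
  PySem.Dict.ofList [('J', (1, 0)), ('B', (-1, 0)), ('F', (0, 1)), ('L', (0, -1))]

-- B's divide-and-conquer displacement (the string is its list of characters; s[:m]/s[m:] = take/drop)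
def pvDisp (s : List Char) : Int × Int :=
  if _h : s.length ≤ 1 then
    match s with
    | [] => (0, 0)
    | c :: _ => pvTable.getD c (0, 0)
  else
    let m := s.length / 2
    let a := pvDisp (s.take m)
    let b := pvDisp (s.drop m)
    (a.1 + b.1, a.2 + b.2)
termination_by s.length
decreasing_by
  · simp; omega
  · simp; omega

-- B's formatting loop body: one (value, positive-word, negative-word) row
def pvRow (parts : List String) (t : Int × String × String) : List String :=
  if t.1 ≠ 0 then
    parts ++ [PySem.Int.toStr |t.1| ++ " lepes " ++ (if t.1 > 0 then t.2.1 else t.2.2)]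
  else parts

def elmozdulas_alt (path : String) : String :=
  let p := pvDisp path.toList
  let x := p.1
  let y := p.2
  if x = 0 ∧ y = 0 then "Nem mentunk sehova"
  else
    let parts := [(x, "jobbra", "balra"), (y, "fel", "le")].foldl pvRow []
    PySem.Str.join ", " parts

-- ===== PRECONDITION & SPEC =====
def Spec_elmozdulas (path : String) (out : String) : Prop := out = elmozdulas_alt path
instance (path : String) (out : String) : Decidable (Spec_elmozdulas path out) := by unfold Spec_elmozdulas; infer_instance

-- ===== CLAIM (what is proved, stated in full; the proofs are below) =====
def Claim_equal_elmozdulas : Prop := ∀ (path : String), Dom_elmozdulas path → Spec_elmozdulas path (elmozdulas path)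

-- ===== LEMMAS AND PROOFS =====

-- A's fold computes the character-count differences
theorem fold_eq_counts (cs : List Char) (x y : Int) :
    cs.foldl pvStep (x, y)
    = (x + cs.count 'J' - cs.count 'B', y + cs.count 'F' - cs.count 'L') := by
  induction cs generalizing x y with
  | nil => simp
  | cons hd tl ih =>
    rw [List.foldl_cons]
    by_cases h1 : hd = 'J'
    · subst h1
      rw [show pvStep (x, y) 'J' = (x + 1, y) from by simp [pvStep], ih]
      refine Prod.ext ?_ ?_ <;> (simp; try ring)
    · by_cases h2 : hd = 'B'
      · subst h2
        rw [show pvStep (x, y) 'B' = (x - 1, y) from by simp [pvStep], ih]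
        refine Prod.ext ?_ ?_ <;> (simp; try ring)
      · by_cases h3 : hd = 'F'
        · subst h3
          rw [show pvStep (x, y) 'F' = (x, y + 1) from by simp [pvStep], ih]
          refine Prod.ext ?_ ?_ <;> (simp; try ring)
        · by_cases h4 : hd = 'L'
          · subst h4
            rw [show pvStep (x, y) 'L' = (x, y - 1) from by simp [pvStep], ih]
            refine Prod.ext ?_ ?_ <;> (simp; try ring)
          · rw [show pvStep (x, y) hd = (x, y) from by simp [pvStep, h1, h2, h3, h4], ih]
            simp [h1, h2, h3, h4]

-- B's divide-and-conquer also computes the character-count differences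
theorem disp_eq_counts (s : List Char) :
    pvDisp s = ((s.count 'J' : Int) - s.count 'B', (s.count 'F' : Int) - s.count 'L') := by
  fun_induction pvDisp s with
  | case1 _ _ => simp
  | case2 c tail _ h =>
    have ht : tail = [] := by
      cases tail with
      | nil => rfl
      | cons a b => simp at h
    subst ht
    by_cases h1 : c = 'J'
    · subst h1; decide
    · by_cases h2 : c = 'B'
      · subst h2; decide
      · by_cases h3 : c = 'F'
        · subst h3; decide
        · by_cases h4 : c = 'L'
          · subst h4; decide
          · have hm : pvTable
                = PySem.Dict.mk [('J', (1, 0)), ('B', (-1, 0)), ('F', (0, 1)), ('L', (0, -1))] := by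
              decide
            have ht : pvTable.getD c (0, 0) = (0, 0) := by
              simp [hm, PySem.Dict.getD, PySem.Dict.get?,
                Ne.symm h1, Ne.symm h2, Ne.symm h3, Ne.symm h4]
            rw [ht]
            simp [h1, h2, h3, h4]
  | case3 s h m a b ih2 ih1 =>
    have hc : ∀ c : Char,
        (s.count c : Int) = (s.take m).count c + (s.drop m).count c := by
      intro c
      conv_lhs => rw [← List.take_append_drop m s]
      rw [List.count_append]
      push_cast
      ring
    have hz : (a.1 + b.1, a.2 + b.2)
        = ((pvDisp (s.take m)).1 + (pvDisp (s.drop m)).1,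
           (pvDisp (s.take m)).2 + (pvDisp (s.drop m)).2) := rfl
    rw [hz, ih2, ih1]
    refine Prod.ext ?_ ?_ <;> simp [hc] <;> ring

-- the two formatting tails agree for every (x, y)
theorem format_eq (x y : Int) :
    (if x = 0 ∧ y = 0 then "Nem mentunk sehova"
     else
       let e : List String := []
       let e := if x > 0 then e ++ [PySem.Int.toStr x ++ " lepes jobbra"]
                else if x < 0 then e ++ [PySem.Int.toStr (-x) ++ " lepes balra"] else e
       let e := if y > 0 then e ++ [PySem.Int.toStr y ++ " lepes fel"]
                else if y < 0 then e ++ [PySem.Int.toStr (-y) ++ " lepes le"] else e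
       PySem.Str.join ", " e)
    = (if x = 0 ∧ y = 0 then "Nem mentunk sehova"
       else PySem.Str.join ", " ([(x, "jobbra", "balra"), (y, "fel", "le")].foldl pvRow [])) := by
  by_cases h0 : x = 0 ∧ y = 0
  · simp [h0]
  · simp only [h0, if_false]
    congr 1
    simp only [List.foldl, pvRow]
    rcases lt_trichotomy x 0 with hx | hx | hx <;>
      rcases lt_trichotomy y 0 with hy | hy | hy <;>
      split_ifs <;>
      first
        | omega
        | simp_all [abs_of_pos, abs_of_neg, String.append_assoc]

-- ===== VERDICT (by name: the statement is the Claim_ definition above) =====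
theorem elmozdulas_spec : Claim_equal_elmozdulas := by
  intro path _
  unfold Spec_elmozdulas elmozdulas elmozdulas_alt
  rw [fold_eq_counts, disp_eq_counts]
  simpa using format_eq ((path.toList.count 'J' : Int) - path.toList.count 'B')
    ((path.toList.count 'F' : Int) - path.toList.count 'L')
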